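-- pv_equiv track=rewrite | github.com/n00bi14/cryptology_practical_course | course_4/Praktikum4.py | getXdach
-- ===== SOURCE A (Python) =====
-- def getXdach(a, b, g):
--     r = [a, b]
--     x = []
--     q = [0, 0]
--     k = 2
--
--     x.append(1)
--     x.append(0)
--
--     while r[k - 1] != g:
--         r.append(r[k - 2] % r[k - 1])
--         q.append(r[k - 2] // r[k - 1])
--         x.append(q[k] * x[k - 1] + x[k - 2])
--
--         k += 1
--
--     return ((-1) ** (k - 1)) * x[k - 1]
-- ===== SOURCE B (Python) =====
-- def getXdach(a, b, g):
--     # Recursive divide-down: compose the 2x2 step matrices M(q)=[[0,1],[1,-q]]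
--     # of the Euclidean chain from the tail back to the front; the answer is the
--     # (2,1) entry of the total product (i.e. its action on the start vector (1,0)).
--     def mat(a, b):
--         if b == g:
--             return (1, 0, 0, 1)
--         q, r = divmod(a, b)
--         m11, m12, m21, m22 = mat(b, r)
--         return (m12, m11 - q * m12, m22, m21 - q * m22)
--     return mat(a, b)[2]
-- ===== Notes on version B (the rewrite author's own statement) =====
-- stated objective: alternative
-- what changed: Replaces A's iterative construction of three growing lists plus a trailing (-1)**(k-1) power by a recursive descent down the Euclidean chain that composes 2x2 step matrices [[0,1],[1,-q]] on the way back up and reads the coefficient off the (2,1) entry of the product.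
import Mathlib
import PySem

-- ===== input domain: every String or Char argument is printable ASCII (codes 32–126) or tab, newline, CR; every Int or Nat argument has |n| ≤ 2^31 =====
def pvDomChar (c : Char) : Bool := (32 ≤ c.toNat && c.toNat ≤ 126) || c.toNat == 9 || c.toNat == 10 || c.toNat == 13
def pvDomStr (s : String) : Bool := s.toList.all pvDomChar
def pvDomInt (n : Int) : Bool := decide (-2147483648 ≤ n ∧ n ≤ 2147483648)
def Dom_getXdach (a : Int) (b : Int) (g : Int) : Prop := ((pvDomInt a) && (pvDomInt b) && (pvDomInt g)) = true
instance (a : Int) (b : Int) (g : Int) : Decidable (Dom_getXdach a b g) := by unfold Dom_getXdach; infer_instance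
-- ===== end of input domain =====

-- B replaces A's growing lists and trailing (-1)^(k-1) power by a recursive descent that
-- composes 2x2 step matrices [[0,1],[1,-q]] and reads the answer off the (2,1) entry
-- (objective: alternative).


-- ===== PORT A =====
-- A's while loop, with the lists r, x, q and the counter k as in the Python; fuel only
-- makes the recursion total (under Pre_ the loop exits before fuel runs out).
def getXdachLoop (g : Int) (fuel : Nat) (r x q : List Int) (k : Nat) : Int :=
  match fuel with
  | 0 => 0
  | fuel + 1 =>
    if r.getD (k - 1) 0 ≠ g then
      let qn := PySem.Int.floordiv (r.getD (k - 2) 0) (r.getD (k - 1) 0)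
      getXdachLoop g fuel (r ++ [PySem.Int.mod (r.getD (k - 2) 0) (r.getD (k - 1) 0)])
        (x ++ [qn * x.getD (k - 1) 0 + x.getD (k - 2) 0]) (q ++ [qn]) (k + 1)
    else ((-1 : Int) ^ (k - 1)) * x.getD (k - 1) 0

def getXdach (a : Int) (b : Int) (g : Int) : Int :=
  getXdachLoop g (b.natAbs + 2) [a, b] [1, 0] [0, 0] 2

-- ===== PORT B =====
-- Source B's recursive helper mat(a, b); the quadruple is (m11, m12, m21, m22).
def getXdachMat (g : Int) (fuel : Nat) (a b : Int) : Int × Int × Int × Int :=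
  match fuel with
  | 0 => (0, 0, 0, 0)
  | fuel + 1 =>
    if b = g then (1, 0, 0, 1)
    else
      let q := PySem.Int.floordiv a b
      let m := getXdachMat g fuel b (PySem.Int.mod a b)
      (m.2.1, m.1 - q * m.2.1, m.2.2.2, m.2.2.1 - q * m.2.2.2)

def getXdach_alt (a : Int) (b : Int) (g : Int) : Int :=
  (getXdachMat g (b.natAbs + 2) a b).2.2.1

-- ===== PRECONDITION & SPEC =====
-- Pre_ excludes exactly the inputs on which A raises ZeroDivisionError: A (and B) return
-- normally iff g is a member of the Euclidean remainder chain b, a % b, …, 0; otherwise a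
-- remainder hits 0 before g and the next '%' divides by zero.  The chain itself has no
-- non-iterative description; it always reaches 0 within |b| + 2 entries, so the bound is exact.
def euclidChain (fuel : Nat) (a b : Int) : List Int :=
  match fuel with
  | 0 => []
  | fuel + 1 => b :: (if b = 0 then [] else euclidChain fuel b (PySem.Int.mod a b))

def Pre_getXdach (a : Int) (b : Int) (g : Int) : Prop := g ∈ euclidChain (b.natAbs + 2) a b
instance (a : Int) (b : Int) (g : Int) : Decidable (Pre_getXdach a b g) := by
  unfold Pre_getXdach; infer_instance

def pvWitness_getXdach : Int × Int × Int := (240, 46, 2)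

def Spec_getXdach (a : Int) (b : Int) (g : Int) (out : Int) : Prop := out = getXdach_alt a b g
instance (a : Int) (b : Int) (g : Int) (out : Int) : Decidable (Spec_getXdach a b g out) := by
  unfold Spec_getXdach; infer_instance

-- ===== CLAIM (what is proved, stated in full; the proofs are below) =====
def Claim_equal_getXdach : Prop :=
  ∀ (a : Int) (b : Int) (g : Int), Dom_getXdach a b g → Pre_getXdach a b g →
    Spec_getXdach a b g (getXdach a b g)

-- ===== LEMMAS AND PROOFS =====

-- Invariant: A's loop value equals the row (m21, m22) of B's composed matrix applied to
-- the signed state vector ((-1)^k x[k-2], (-1)^(k-1) x[k-1]).  Holds for every fuel.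
theorem loop_eq (g : Int) (fuel : Nat) :
    ∀ (r x q : List Int) (k : Nat), 2 ≤ k → r.length = k → x.length = k →
    getXdachLoop g fuel r x q k =
      (getXdachMat g fuel (r.getD (k - 2) 0) (r.getD (k - 1) 0)).2.2.1
          * ((-1 : Int) ^ k * x.getD (k - 2) 0)
        + (getXdachMat g fuel (r.getD (k - 2) 0) (r.getD (k - 1) 0)).2.2.2
          * ((-1 : Int) ^ (k - 1) * x.getD (k - 1) 0) := by
  induction fuel with
  | zero => intro r x q k hk hr hx; simp [getXdachLoop, getXdachMat]
  | succ fuel ih =>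
    intro r x q k hk hr hx
    obtain ⟨j, rfl⟩ : ∃ j, k = j + 2 := ⟨k - 2, by omega⟩
    simp only [getXdachLoop, getXdachMat,
      show j + 2 - 1 = j + 1 by omega, show j + 2 - 2 = j by omega]
    by_cases hstop : r.getD (j + 1) 0 = g
    · have hstop' : r[j + 1]?.getD 0 = g := by simpa [List.getD] using hstop
      simp only [List.getD] at *
      simp [hstop']
    · rw [if_pos hstop, if_neg hstop]
      rw [ih _ _ _ (j + 3) (by omega) (by simp [hr]) (by simp [hx])]
      simp only [show j + 3 - 1 = j + 2 by omega, show j + 3 - 2 = j + 1 by omega]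
      have hlr : r.length = j + 2 := hr
      have hlx : x.length = j + 2 := hx
      have hgr2 : (r ++ [PySem.Int.mod (r.getD j 0) (r.getD (j + 1) 0)]).getD (j + 1) 0
          = r.getD (j + 1) 0 := List.getD_append _ _ _ _ (by omega)
      have hgr1 : (r ++ [PySem.Int.mod (r.getD j 0) (r.getD (j + 1) 0)]).getD (j + 2) 0
          = PySem.Int.mod (r.getD j 0) (r.getD (j + 1) 0) := by
        simp [List.getD, hlr]
      have hgx2 : (x ++ [PySem.Int.floordiv (r.getD j 0) (r.getD (j + 1) 0) * x.getD (j + 1) 0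
              + x.getD j 0]).getD (j + 1) 0 = x.getD (j + 1) 0 :=
        List.getD_append _ _ _ _ (by omega)
      have hgx1 : (x ++ [PySem.Int.floordiv (r.getD j 0) (r.getD (j + 1) 0) * x.getD (j + 1) 0
              + x.getD j 0]).getD (j + 2) 0
          = PySem.Int.floordiv (r.getD j 0) (r.getD (j + 1) 0) * x.getD (j + 1) 0
              + x.getD j 0 := by
        simp [List.getD, hlx]
      rw [hgr2, hgr1, hgx2, hgx1]
      ring

-- ===== VERDICT =====
theorem getXdach_spec : Claim_equal_getXdach := by
  unfold Claim_equal_getXdach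
  intro a b g _ _
  unfold Spec_getXdach getXdach getXdach_alt
  rw [loop_eq g (b.natAbs + 2) [a, b] [1, 0] [0, 0] 2 (by omega) rfl rfl]
  norm_num
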